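-- pv_equiv track=rewrite | github.com/enerone/listings-poc-with-agents | app/agents/image_finder.py | _filter_and_deduplicate
-- ===== SOURCE A (Python) =====
-- from typing import Dict, Any, List, Optional
--
-- def _filter_and_deduplicate(images: List[Dict], existing_images: List[str] = None) -> List[Dict]:
--     """Filter and remove duplicate images"""
--
--     if not images:
--         return []
--
--     # Remove duplicates based on URL
--     seen_urls = set()
--     if existing_images:
--         seen_urls.update(existing_images)
--
--     filtered = []
--     for img in images:
--         url = img.get("url", "")
--         if url and url not in seen_urls:
--             seen_urls.add(url)
--             filtered.append(img)
--
--     # Sort by relevance (main images first, then details, etc.)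
--     type_priority = {"main": 1, "detail": 2, "usage": 3, "lifestyle": 4, "packaging": 5}
--     filtered.sort(key=lambda x: type_priority.get(x.get("type", ""), 999))
--
--     return filtered
-- ===== SOURCE B (Python) =====
-- def _filter_and_deduplicate(images, existing_images=None):
--     """Filter and remove duplicate images (dedup by URL, then a stable
--     bucket pass per priority instead of a comparison sort)."""
--     if not images:
--         return []
--     seen_urls = set()
--     if existing_images:
--         seen_urls.update(existing_images)
--     filtered = []
--     for img in images:
--         url = img.get("url", "")
--         if url and url not in seen_urls:
--             seen_urls.add(url)
--             filtered.append(img)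
--     type_priority = {"main": 1, "detail": 2, "usage": 3, "lifestyle": 4, "packaging": 5}
--     out = []
--     for p in (1, 2, 3, 4, 5, 999):
--         for img in filtered:
--             if type_priority.get(img.get("type", ""), 999) == p:
--                 out.append(img)
--     return out
-- ===== Notes on version B (the rewrite author's own statement) =====
-- stated objective: alternative
-- what changed: Replaces the stable comparison sort (list.sort with a priority key) by six priority bucket passes: for each priority value in ascending order, append the filtered images with that key, which reproduces the stable sort order without comparisons.
import Mathlib
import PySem

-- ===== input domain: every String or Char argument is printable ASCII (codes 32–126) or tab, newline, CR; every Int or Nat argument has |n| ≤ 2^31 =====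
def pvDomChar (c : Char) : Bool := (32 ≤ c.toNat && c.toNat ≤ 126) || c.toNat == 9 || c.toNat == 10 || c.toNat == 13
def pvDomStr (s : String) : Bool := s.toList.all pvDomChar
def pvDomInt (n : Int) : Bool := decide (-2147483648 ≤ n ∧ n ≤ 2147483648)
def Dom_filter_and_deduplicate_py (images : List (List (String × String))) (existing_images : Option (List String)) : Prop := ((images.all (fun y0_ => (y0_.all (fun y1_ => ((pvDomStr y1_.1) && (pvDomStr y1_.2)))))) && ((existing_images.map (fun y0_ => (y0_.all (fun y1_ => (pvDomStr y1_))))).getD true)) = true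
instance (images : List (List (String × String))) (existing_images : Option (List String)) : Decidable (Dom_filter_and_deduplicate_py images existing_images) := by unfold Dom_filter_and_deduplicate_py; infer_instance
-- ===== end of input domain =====

-- B replaces the stable comparison sort by six ascending priority bucket passes; alternative decomposition, return value identical.

-- type_priority.get(img.get("type", ""), 999)  — identical expression in both Pythons
def pvTypeKey (img : List (String × String)) : Int :=
  PySem.Dict.getD
    (PySem.Dict.mk [("main", (1 : Int)), ("detail", 2), ("usage", 3), ("lifestyle", 4), ("packaging", 5)])
    (PySem.Dict.getD (PySem.Dict.mk img) "type" "") 999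

-- seen_urls = set(); if existing_images: seen_urls.update(existing_images)  — identical in both Pythons
def pvSeen0 (existing_images : Option (List String)) : PySem.Set String :=
  match existing_images with
  | none => PySem.Set.empty
  | some l => if l ≠ [] then PySem.Set.update PySem.Set.empty l else PySem.Set.empty

-- ===== PORT A =====
def filter_and_deduplicate_py (images : List (List (String × String))) (existing_images : Option (List String)) : List (List (String × String)) :=
  if images = [] then []
  else
    let st := images.foldl
      (fun (st : PySem.Set String × List (List (String × String))) img =>
        let url := PySem.Dict.getD (PySem.Dict.mk img) "url" ""
        if url ≠ "" ∧ ¬ url ∈ st.1 then (PySem.Set.add st.1 url, st.2 ++ [img]) else st)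
      (pvSeen0 existing_images, [])
    PySem.List.sorted st.2 pvTypeKey false

-- ===== PORT B =====
-- the dedup loop, written as structural recursion carrying the seen set
def pvDedupB (seen : PySem.Set String) : List (List (String × String)) → List (List (String × String))
  | [] => []
  | img :: rest =>
    let url := PySem.Dict.getD (PySem.Dict.mk img) "url" ""
    if url ≠ "" ∧ ¬ url ∈ seen then img :: pvDedupB (PySem.Set.add seen url) rest
    else pvDedupB seen rest

def filter_and_deduplicate_py_alt (images : List (List (String × String))) (existing_images : Option (List String)) : List (List (String × String)) :=
  if images = [] then []
  else
    let filtered := pvDedupB (pvSeen0 existing_images) images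
    [(1 : Int), 2, 3, 4, 5, 999].foldl
      (fun out p => filtered.foldl (fun out img => if pvTypeKey img == p then out ++ [img] else out) out)
      []

-- ===== PRECONDITION & SPEC =====
def Spec_filter_and_deduplicate_py (images : List (List (String × String))) (existing_images : Option (List String)) (out : List (List (String × String))) : Prop := out = filter_and_deduplicate_py_alt images existing_images
instance (images : List (List (String × String))) (existing_images : Option (List String)) (out : List (List (String × String))) : Decidable (Spec_filter_and_deduplicate_py images existing_images out) := by unfold Spec_filter_and_deduplicate_py; infer_instance

-- ===== CLAIM (what is proved, stated in full; the proofs are below) =====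
def Claim_equal_filter_and_deduplicate_py : Prop := ∀ (images : List (List (String × String))) (existing_images : Option (List String)), Dom_filter_and_deduplicate_py images existing_images → Spec_filter_and_deduplicate_py images existing_images (filter_and_deduplicate_py images existing_images)

-- ===== LEMMAS AND PROOFS =====

-- A's fold-with-accumulator dedup equals B's recursive dedup
theorem dedup_fold_eq (images : List (List (String × String))) :
    ∀ (seen : PySem.Set String) (acc : List (List (String × String))),
    (images.foldl
      (fun (st : PySem.Set String × List (List (String × String))) img =>
        let url := PySem.Dict.getD (PySem.Dict.mk img) "url" ""
        if url ≠ "" ∧ ¬ url ∈ st.1 then (PySem.Set.add st.1 url, st.2 ++ [img]) else st)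
      (seen, acc)).2 = acc ++ pvDedupB seen images := by
  induction images with
  | nil => intro seen acc; simp [pvDedupB]
  | cons img rest ih =>
    intro seen acc
    simp only [List.foldl_cons]
    by_cases h1 : PySem.Dict.getD (PySem.Dict.mk img) "url" "" = ""
    · simp [pvDedupB, h1, ih]
    · by_cases h2 : PySem.Dict.getD (PySem.Dict.mk img) "url" "" ∈ seen
      · simp [pvDedupB, h1, h2, ih]
      · simp [pvDedupB, h1, h2, ih]

theorem key_mem (img : List (String × String)) :
    pvTypeKey img ∈ [(1 : Int), 2, 3, 4, 5, 999] := by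
  unfold pvTypeKey
  simp only [PySem.Dict.getD, PySem.Dict.get?, List.find?]
  split <;> simp_all <;> split <;> simp_all <;> split <;> simp_all <;> split <;> simp_all <;>
    split <;> simp_all

theorem insertBy_append_left {α : Type} (before : α → α → Bool) (x : α) (s t : List α)
    (h : ∀ y ∈ s, before x y = false) :
    PySem.List.insertBy before x (s ++ t) = s ++ PySem.List.insertBy before x t := by
  induction s with
  | nil => simp
  | cons y ys ih =>
    have hy : before x y = false := h y (by simp)
    simp [PySem.List.insertBy, hy, ih (fun z hz => h z (by simp [hz]))]

theorem insertBy_front {α : Type} (before : α → α → Bool) (x : α) (t : List α)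
    (h : ∀ y ∈ t, before x y = true) :
    PySem.List.insertBy before x t = x :: t := by
  cases t with
  | nil => simp [PySem.List.insertBy]
  | cons y ys => simp [PySem.List.insertBy, h y (by simp)]

theorem insertBy_flatMap {α : Type} (key : α → Int) (x : α) :
    ∀ (ks : List Int), ks.Pairwise (· < ·) → key x ∈ ks →
    ∀ (f : Int → List α), (∀ k ∈ ks, ∀ y ∈ f k, key y = k) →
    PySem.List.insertBy (fun a b => decide (key a < key b)) x (ks.flatMap f) =
      ks.flatMap (fun k => f k ++ if key x == k then [x] else []) := by
  intro ks
  induction ks with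
  | nil => intro _ hmem; simp at hmem
  | cons k ks' ih =>
    intro hpw hmem f hf
    have hpw' := (List.pairwise_cons.mp hpw).2
    have hlt : ∀ k' ∈ ks', k < k' := (List.pairwise_cons.mp hpw).1
    by_cases hk : key x = k
    · -- x belongs in the first bucket: passes f k, sits right after it
      have h1 : ∀ y ∈ f k, (fun a b => decide (key a < key b)) x y = false := by
        intro y hy
        have := hf k (by simp) y hy
        simp [this, hk]
      have h2 : ∀ y ∈ ks'.flatMap f, (fun a b => decide (key a < key b)) x y = true := by
        intro y hy
        rcases List.mem_flatMap.mp hy with ⟨k', hk', hy'⟩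
        have := hf k' (by simp [hk']) y hy'
        simp [this, hk]
        exact hlt k' hk'
      have htail : ∀ k' ∈ ks', (key x == k') = false := by
        intro k' hk'
        have := hlt k' hk'
        simp [hk]; omega
      have hrest : ks'.flatMap (fun k' => f k' ++ if key x == k' then [x] else []) = ks'.flatMap f :=
        List.flatMap_congr (fun k' hk' => by simp [htail k' hk'])
      rw [List.flatMap_cons, insertBy_append_left _ _ _ _ h1, insertBy_front _ _ _ h2,
        List.flatMap_cons, hrest]
      simp [hk]
    · -- x belongs further right: passes the whole first bucket
      have hmem' : key x ∈ ks' := by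
        rcases List.mem_cons.mp hmem with h | h
        · exact absurd h hk
        · exact h
      have hklt : k < key x := hlt _ hmem'
      have h1 : ∀ y ∈ f k, (fun a b => decide (key a < key b)) x y = false := by
        intro y hy
        have := hf k (by simp) y hy
        simp [this]; omega
      have hxk : (key x == k) = false := by simp [hk]
      rw [List.flatMap_cons, insertBy_append_left _ _ _ _ h1,
        ih hpw' hmem' f (fun k' hk' => hf k' (by simp [hk'])), List.flatMap_cons, hxk]
      simp

theorem sorted_eq_buckets {α : Type} (key : α → Int) (ks : List Int) (hpw : ks.Pairwise (· < ·)) :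
    ∀ (xs : List α), (∀ x ∈ xs, key x ∈ ks) →
    PySem.List.sorted xs key false = ks.flatMap (fun k => xs.filter (fun x => key x == k)) := by
  intro xs
  induction xs using List.reverseRecOn with
  | nil => intro _; simp [PySem.List.sorted]
  | append_singleton xs x ih =>
    intro hmem
    rw [PySem.List.sorted_eq_foldl_insertBy, List.foldl_append, List.foldl_cons, List.foldl_nil,
      ← PySem.List.sorted_eq_foldl_insertBy, ih (fun y hy => hmem y (by simp [hy]))]
    rw [insertBy_flatMap key x ks hpw (hmem x (by simp))
      (fun k => xs.filter (fun y => key y == k))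
      (by intro k _ y hy; exact eq_of_beq (List.mem_filter.mp hy).2)]
    apply List.flatMap_congr
    intro k _
    simp [List.filter_append, List.filter_singleton]

theorem bucket_fold_eq (filtered : List (List (String × String))) :
    [(1 : Int), 2, 3, 4, 5, 999].foldl
      (fun out p => filtered.foldl (fun out img => if pvTypeKey img == p then out ++ [img] else out) out)
      [] =
    [(1 : Int), 2, 3, 4, 5, 999].flatMap (fun k => filtered.filter (fun img => pvTypeKey img == k)) := by
  have hfn : (fun (out : List (List (String × String))) (p : Int) =>
      filtered.foldl (fun out img => if pvTypeKey img == p then out ++ [img] else out) out) =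
      (fun out p => out ++ filtered.filter (fun img => pvTypeKey img == p)) := by
    funext out p
    exact PySem.List.foldl_append_if_eq_filter _ filtered out
  rw [hfn, PySem.List.foldl_append_eq_flatMap]
  simp

-- ===== VERDICT (by name: the statement is the Claim_ definition above) =====
theorem filter_and_deduplicate_py_spec : Claim_equal_filter_and_deduplicate_py := by
  intro images existing_images _
  unfold Spec_filter_and_deduplicate_py filter_and_deduplicate_py filter_and_deduplicate_py_alt
  by_cases h : images = []
  · simp [h]
  · simp only [h, if_false]
    rw [dedup_fold_eq images (pvSeen0 existing_images) []]
    simp only [List.nil_append]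
    rw [sorted_eq_buckets pvTypeKey [(1 : Int), 2, 3, 4, 5, 999] (by decide)
      (pvDedupB (pvSeen0 existing_images) images) (fun x _ => key_mem x)]
    rw [bucket_fold_eq (pvDedupB (pvSeen0 existing_images) images)]
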